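-- pv_equiv track=rewrite | github.com/HD-KSOE/masters_challenge_Garden | level1/[1차] 비밀지도.py | solution
-- ===== SOURCE A (Python) =====
-- def solution(n, arr1, arr2):
--     answer = []
--     for i in range(n):
--         tmp = bin(arr1[i] | arr2[i])
--         tmp = tmp[2:].zfill(n)
--         tmp = tmp.replace("0"," ").replace("1","#")
--         answer.append(tmp)
--
--     return answer
-- ===== SOURCE B (Python) =====
-- def solution(n, arr1, arr2):
--     rows = []
--     for i in range(n):
--         v = arr1[i] | arr2[i]
--         bits = []  # row characters, lowest bit first
--         while True:
--             bits.append('#' if v & 1 else ' ')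
--             v >>= 1
--             if v == 0:
--                 break
--         rows.append(''.join(reversed(bits)).rjust(n))
--     return rows
-- ===== Notes on version B (the rewrite author's own statement) =====
-- stated objective: alternative
-- what changed: Rows are built by extracting bits arithmetically (v & 1, v >>= 1) into a character list that is reversed and right-justified, instead of A's bin()-string slicing, zfill padding and double replace() pipeline; Pre_ excludes rows containing a negative entry, where A's bin()[2:] leaves the 'b' of the '-0b' prefix in the output (an artefact of the string pipeline) and B's bit loop does not terminate.
-- outside the precondition, e.g. on solution(1, [-5], [0]): A returns ['b# #'], B does not finish within the time limit
import Mathlib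
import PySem

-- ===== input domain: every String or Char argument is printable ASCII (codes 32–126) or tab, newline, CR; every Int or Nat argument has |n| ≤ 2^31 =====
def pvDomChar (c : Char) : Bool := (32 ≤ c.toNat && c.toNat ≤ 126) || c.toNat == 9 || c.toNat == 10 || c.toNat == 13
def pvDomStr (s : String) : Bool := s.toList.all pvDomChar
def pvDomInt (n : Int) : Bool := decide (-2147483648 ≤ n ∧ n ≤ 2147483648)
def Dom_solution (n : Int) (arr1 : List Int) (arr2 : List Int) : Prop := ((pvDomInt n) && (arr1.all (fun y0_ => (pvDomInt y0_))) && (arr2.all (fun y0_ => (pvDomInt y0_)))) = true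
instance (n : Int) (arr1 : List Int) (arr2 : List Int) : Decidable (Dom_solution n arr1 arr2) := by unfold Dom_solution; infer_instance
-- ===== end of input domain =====

-- B builds each row by extracting the bits of arr1[i] | arr2[i] arithmetically (v & 1, v >>= 1) into a list that is
-- reversed and right-justified, instead of A's bin()/zfill()/replace() string pipeline; alternative decomposition, same cost.

-- ===== PORT A =====
def solution (n : Int) (arr1 : List Int) (arr2 : List Int) : List String :=
  (PySem.List.pyRange 0 n 1).foldl (fun answer i =>
    -- arr1[i] | arr2[i]; the IndexError case (n > length) is excluded by Pre_solution
    let tmp := PySem.Int.toBinChars0b (PySem.Int.bor (PySem.List.pyGetD arr1 i 0) (PySem.List.pyGetD arr2 i 0))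
    let tmp := PySem.Chars.zfill (PySem.Chars.slice tmp (some 2) none) n
    let tmp := PySem.Chars.replace (PySem.Chars.replace tmp ['0'] [' ']) ['1'] ['#']
    answer ++ [String.mk tmp]) []

-- ===== PORT B =====
-- Source B's do-while over v: append '#'/' ' for v & 1, then v >>= 1, stop when v == 0.
-- The loop is totalised with fuel (v.toNat + 1 iterations always suffice for the nonnegative v admitted by Pre_solution;
-- on a negative v the Python loop does not terminate, and such inputs are outside Pre_solution).
def altBits (fuel : Nat) (v : Int) : List Char :=
  match fuel with
  | 0 => []
  | f + 1 =>
    (if PySem.Int.band v 1 ≠ 0 then '#' else ' ') ::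
      (if v >>> (1 : Nat) = 0 then [] else altBits f (v >>> (1 : Nat)))

def solution_alt (n : Int) (arr1 : List Int) (arr2 : List Int) : List String :=
  (PySem.List.pyRange 0 n 1).foldl (fun rows i =>
    let v := PySem.Int.bor (PySem.List.pyGetD arr1 i 0) (PySem.List.pyGetD arr2 i 0)
    let row := (altBits (v.toNat + 1) v).reverse       -- ''.join(reversed(bits))
    -- .rjust(n): left-pad with spaces to width n (no pad when n ≤ len)
    rows ++ [String.mk (List.replicate (n.toNat - row.length) ' ' ++ row)]) []

-- ===== PRECONDITION & SPEC =====
-- Pre_ excludes n beyond either list's length (A raises IndexError) and rows whose entries include a negative value: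
-- there A's bin()[2:] keeps the 'b' of the '-0b' prefix in the emitted row — an artefact of the string pipeline —
-- and B's own bit loop does not terminate on a negative value.
def Pre_solution (n : Int) (arr1 : List Int) (arr2 : List Int) : Prop :=
  n ≤ (arr1.length : Int) ∧ n ≤ (arr2.length : Int) ∧
  (∀ x ∈ arr1.take n.toNat, 0 ≤ x) ∧ (∀ x ∈ arr2.take n.toNat, 0 ≤ x)
instance (n : Int) (arr1 : List Int) (arr2 : List Int) : Decidable (Pre_solution n arr1 arr2) := by unfold Pre_solution; infer_instance

def pvWitness_solution : Int × List Int × List Int := (2, [9, 20], [30, 1])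

def Spec_solution (n : Int) (arr1 : List Int) (arr2 : List Int) (out : List String) : Prop := out = solution_alt n arr1 arr2
instance (n : Int) (arr1 : List Int) (arr2 : List Int) (out : List String) : Decidable (Spec_solution n arr1 arr2 out) := by unfold Spec_solution; infer_instance

-- ===== CLAIM (what is proved, stated in full; the proofs are below) =====
def Claim_equal_solution : Prop := ∀ (n : Int) (arr1 : List Int) (arr2 : List Int), Dom_solution n arr1 arr2 → Pre_solution n arr1 arr2 → Spec_solution n arr1 arr2 (solution n arr1 arr2)

-- ===== LEMMAS AND PROOFS =====

-- the bit characters of a natural number m, lowest bit first: the mathematical content of B's loop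
def altN (a : Nat) : List Char :=
  (if a &&& 1 ≠ 0 then '#' else ' ') ::
    (if _h : a >>> 1 = 0 then [] else altN (a >>> 1))
decreasing_by simp only [Nat.shiftRight_eq_div_pow, pow_one] at *; omega

-- the fuelled Int loop of the port computes altN on a nonnegative value, given enough fuel
lemma altBits_cast : ∀ (fuel m : Nat), m < fuel → altBits fuel (↑m) = altN m := by
  intro fuel
  induction fuel with
  | zero => intro m h; omega
  | succ f ih =>
    intro m h
    rw [altBits, altN]
    have h1 : ((m : Int) >>> (1 : Nat)) = ((m >>> 1 : Nat) : Int) := by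
      simp [Int.natCast_shiftRight]
    have h2 : PySem.Int.band (↑m) 1 = ((m &&& 1 : Nat) : Int) := by
      simpa using PySem.Int.band_natCast m 1
    have h3 : (if ((m : Int)) % 2 = 1 then '#' else ' ') = (if m % 2 = 1 then '#' else ' ') := by
      rcases Nat.mod_two_eq_zero_or_one m with hm | hm <;>
        simp [hm, show ((m : Int)) % 2 = ((m % 2 : Nat) : Int) from by omega]
    by_cases h0 : m >>> 1 = 0
    · simp [h1, h2, h0, h3]
    · have hm2 : 2 ≤ m := by
        simp only [Nat.shiftRight_eq_div_pow, pow_one] at h0; omega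
      have hrec : m >>> 1 < f := by
        simp only [Nat.shiftRight_eq_div_pow, pow_one]; omega
      simp only [h1, h2, Nat.cast_eq_zero, h0, if_false, dite_false, ih _ hrec]
      simp [h3]

-- the binary digit string of m, high bit first (= bin(m)[2:] for m ≥ 0)
def natBits (m : Nat) : List Char :=
  if _h : m < 2 then [Nat.digitChar m] else natBits (m / 2) ++ [Nat.digitChar (m % 2)]
decreasing_by exact Nat.div_lt_self (by omega) (by omega)

lemma toDigitsCore_eq_natBits (fuel : Nat) : ∀ (m : Nat) (acc : List Char),
    m < fuel → Nat.toDigitsCore 2 fuel m acc = natBits m ++ acc := by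
  induction fuel with
  | zero => intro m acc h; omega
  | succ f ih =>
    intro m acc h
    rw [Nat.toDigitsCore]
    by_cases h2 : m / 2 = 0
    · simp only [h2, if_true]
      rw [natBits]
      have : m < 2 := by omega
      simp [this, Nat.mod_eq_of_lt this]
    · simp only [h2, if_false]
      rw [ih (m / 2) _ (by omega)]
      conv_rhs => rw [natBits]
      have hm2 : ¬ m < 2 := by omega
      simp [hm2]

lemma toDigits_eq_natBits (m : Nat) : Nat.toDigits 2 m = natBits m :=
  toDigitsCore_eq_natBits (m + 1) m [] (by omega) |>.trans (by simp)

lemma natBits_ne_nil (m : Nat) : natBits m ≠ [] := by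
  rw [natBits]; split <;> simp

lemma natBits_mem (m : Nat) : ∀ c ∈ natBits m, c = '0' ∨ c = '1' := by
  induction m using natBits.induct with
  | case1 m h =>
    rw [natBits]; simp only [h, dite_true]
    interval_cases m <;> simp [Nat.digitChar]
  | case2 m h ih =>
    rw [natBits]; simp only [h, dite_false]
    intro c hc
    rcases List.mem_append.mp hc with h1 | h1
    · exact ih c h1
    · have : m % 2 = 0 ∨ m % 2 = 1 := by omega
      rcases this with h2 | h2 <;> rw [h2] at h1 <;>
        simp only [show Nat.digitChar 0 = '0' from rfl, show Nat.digitChar 1 = '1' from rfl,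
          List.mem_singleton] at h1 <;> simp [h1]

-- B's low-first bit list, reversed, is A's digit string translated to '#'/' '
lemma altN_reverse (m : Nat) :
    (altN m).reverse = (natBits m).map (fun c => if c = '0' then ' ' else '#') := by
  induction m using natBits.induct with
  | case1 m h =>
    rw [natBits, altN]
    have h1 : m >>> 1 = 0 := by
      simp only [Nat.shiftRight_eq_div_pow, pow_one]; omega
    simp only [h, dite_true, h1]
    interval_cases m <;> rfl
  | case2 m h ih =>
    rw [natBits, altN]
    have h1 : m >>> 1 = m / 2 := by
      simp only [Nat.shiftRight_eq_div_pow, pow_one]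
    have h2 : ¬ m >>> 1 = 0 := by rw [h1]; omega
    simp only [h, dite_false, h2, h1, List.reverse_cons, ih, List.map_append]
    have h3 : m &&& 1 = m % 2 := Nat.and_one_is_mod m
    rcases (by omega : m % 2 = 0 ∨ m % 2 = 1) with h4 | h4 <;>
      simp [h3, h4, ih, show ¬ m ≤ 1 from by omega] <;> decide

lemma altN_length (m : Nat) : (altN m).length = (natBits m).length := by
  have := congrArg List.length (altN_reverse m)
  simpa using this

-- single-character replace is a map
lemma replace_go_single (c d : Char) : ∀ (fuel : Nat) (l acc : List Char), l.length ≤ fuel →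
    PySem.Chars.replace.go [c] [d] fuel l acc
      = acc.reverse ++ l.map (fun x => if x = c then d else x) := by
  intro fuel
  induction fuel with
  | zero => intro l acc h; rw [PySem.Chars.replace.go]; cases l <;> simp_all
  | succ f ih =>
    intro l acc h
    cases l with
    | nil =>
      rw [PySem.Chars.replace.go]
      · simp
      · omega
    | cons x t =>
      rw [PySem.Chars.replace.go]
      by_cases hx : x = c
      · have hp : List.isPrefixOf [c] (x :: t) = true := by simp [List.isPrefixOf, hx]
        simp only [hp, if_true]
        rw [ih _ _ (by simpa using Nat.le_of_succ_le_succ (by simpa using h))]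
        simp [hx]
      · have hp : List.isPrefixOf [c] (x :: t) = false := by
          simp [List.isPrefixOf]; exact fun hh => absurd hh.symm hx
        simp only [hp, Bool.false_eq_true, if_false]
        rw [ih _ _ (by simpa using h)]
        simp [hx]

lemma replace_single (s : List Char) (c d : Char) :
    PySem.Chars.replace s [c] [d] = s.map (fun x => if x = c then d else x) := by
  rw [PySem.Chars.replace]
  simp only [List.isEmpty_cons, Bool.false_eq_true, if_false]
  exact replace_go_single c d s.length s [] le_rfl

-- zfill on a nonempty string whose first character is not a sign is a left pad
lemma zfill_pad (cs : List Char) (n : Int) (hne : cs ≠ [])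
    (hsign : ∀ c, cs.head? = some c → ¬ (c = '+' ∨ c = '-')) :
    PySem.Chars.zfill cs n = List.replicate (max n.toNat cs.length - cs.length) '0' ++ cs := by
  rw [PySem.Chars.zfill.eq_def]
  by_cases h : n ≤ (cs.length : Int)
  · have : max n.toNat cs.length = cs.length := by omega
    simp [h, this]
  · simp only [h, if_false]
    cases cs with
    | nil => simp at hne
    | cons x t =>
      have hx : ¬ (x = '+' ∨ x = '-') := hsign x rfl
      have hlen : n.toNat = max n.toNat (x :: t).length := by
        simp only [List.length_cons] at h ⊢; omega
      simp only [hx, if_false]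
      rw [← hlen]

-- per-row equality: A's formatted row equals B's padded bit row, for every nonnegative v, as soon as 1 ≤ n
lemma row_eq (v : Int) (n : Int) (hn : 1 ≤ n) (hv : 0 ≤ v) :
    PySem.Chars.replace (PySem.Chars.replace
        (PySem.Chars.zfill (PySem.Chars.slice (PySem.Int.toBinChars0b v) (some 2) none) n)
        ['0'] [' ']) ['1'] ['#']
    = List.replicate (n.toNat - (altN v.toNat).reverse.length) ' ' ++ (altN v.toNat).reverse := by
  have hmap : (natBits v.toNat).map
        ((fun x => if x = '1' then '#' else x) ∘ fun x => if x = '0' then ' ' else x)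
      = (natBits v.toNat).map (fun c => if c = '0' then ' ' else '#') := by
    apply List.map_congr_left
    intro c hc
    rcases natBits_mem v.toNat c hc with h | h <;> rw [h] <;> rfl
  have hvlt : ¬ v < 0 := by omega
  have hbin : PySem.Chars.slice (PySem.Int.toBinChars0b v) (some 2) none
      = natBits v.toNat := by
    rw [PySem.Int.toBinChars0b, if_neg hvlt,
      PySem.Chars.slice, PySem.List.slice_from _ (by norm_num : (0:Int) ≤ 2)]
    simp [toDigits_eq_natBits]
  rw [hbin,
    zfill_pad _ _ (natBits_ne_nil _) (by
      intro c hc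
      have : c ∈ natBits v.toNat := by
        cases h : natBits v.toNat with
        | nil => exact absurd h (natBits_ne_nil _)
        | cons y t => rw [h] at hc; simp at hc; simp [h, hc]
      rcases natBits_mem _ c this with h | h <;> rw [h] <;> decide),
    replace_single, replace_single, List.map_map, List.map_append, List.map_replicate,
    altN_reverse]
  rw [hmap]
  have hcnt : max n.toNat (natBits v.toNat).length - (natBits v.toNat).length
      = n.toNat - (altN v.toNat).reverse.length := by
    rw [List.length_reverse, altN_length]; omega
  rw [hcnt]
  simp [Function.comp, altN_length]

lemma foldl_shape (f : Int → String) (l : List Int) :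
    l.foldl (fun acc i => acc ++ [f i]) ([] : List String) = l.map f :=
  PySem.List.foldl_append_singleton_eq_map f l []

lemma altBits_fuel (w : Int) (hw : 0 ≤ w) : altBits (w.toNat + 1) w = altN w.toNat := by
  obtain ⟨m, rfl⟩ : ∃ m : Nat, w = (m : Int) := ⟨w.toNat, by omega⟩
  simpa using altBits_cast (m + 1) m (Nat.lt_succ_self _)

-- ===== VERDICT (by name: the statement is the Claim_ definition above) =====
theorem solution_spec : Claim_equal_solution := by
  intro n arr1 arr2 _ hpre
  obtain ⟨h1, h2, hpos1, hpos2⟩ := hpre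
  show solution n arr1 arr2 = solution_alt n arr1 arr2
  unfold solution solution_alt
  rw [foldl_shape, foldl_shape]
  apply List.map_congr_left
  intro i hi
  have hmem : 0 ≤ i ∧ i < n := by
    have := (PySem.List.mem_pyRange_one).mp hi
    omega
  obtain ⟨hi0, hin⟩ := hmem
  have hn1 : 1 ≤ n := by omega
  have hlt1 : i < (arr1.length : Int) := lt_of_lt_of_le hin h1
  have hlt2 : i < (arr2.length : Int) := lt_of_lt_of_le hin h2
  rw [PySem.List.pyGetD_eq_getElem arr1 0 hi0 hlt1, PySem.List.pyGetD_eq_getElem arr2 0 hi0 hlt2]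
  have ha : 0 ≤ arr1[i.toNat]'(by omega) := by
    have h' : i.toNat < (arr1.take n.toNat).length := by simp; omega
    have hm := List.getElem_mem h'
    rw [List.getElem_take] at hm
    exact hpos1 _ hm
  have hb : 0 ≤ arr2[i.toNat]'(by omega) := by
    have h' : i.toNat < (arr2.take n.toNat).length := by simp; omega
    have hm := List.getElem_mem h'
    rw [List.getElem_take] at hm
    exact hpos2 _ hm
  have hv : 0 ≤ PySem.Int.bor (arr1[i.toNat]'(by omega)) (arr2[i.toNat]'(by omega)) := by
    rw [PySem.Int.bor_of_nonneg ha hb]; positivity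
  refine congrArg String.mk ?_
  rw [altBits_fuel _ hv]
  exact row_eq _ n hn1 hv
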